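-- pv_equiv track=rewrite | github.com/Think-Big-Media/3.1-ui-war-room-netlify | agents/pieces_integration.py | _analyze_java_pattern
-- ===== SOURCE A (Python) =====
-- from typing import Dict, List, Optional, Any, Set, Tuple
--
-- def _analyze_java_pattern(content: str) -> Dict[str, Any]:
--     """Analyze Java-specific patterns"""
--     return {
--         "classes": content.count('class '),
--         "methods": content.count('public ') + content.count('private ') + content.count('protected '),
--         "interfaces": content.count('interface '),
--         "annotations": content.count('@'),
--         "imports": len([line for line in content.split('\n') if line.strip().startswith('import')])
--     }
-- ===== SOURCE B (Python) =====
-- def _analyze_java_pattern(content: str):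
--     """Analyze Java-specific patterns (single pass over the lines)"""
--     classes = methods = interfaces = annotations = imports = 0
--     for line in content.split('\n'):
--         classes += line.count('class ')
--         methods += line.count('public ') + line.count('private ') + line.count('protected ')
--         interfaces += line.count('interface ')
--         annotations += line.count('@')
--         if line.strip().startswith('import'):
--             imports += 1
--     return {
--         "classes": classes,
--         "methods": methods,
--         "interfaces": interfaces,
--         "annotations": annotations,
--         "imports": imports,
--     }
-- ===== Notes on version B (the rewrite author's own statement) =====
-- stated objective: alternative
-- what changed: Five independent whole-string substring scans plus a separate split-based comprehension are replaced by a single fold over content.split(' ') that maintains all five tallies at once (valid because none of the counted substrings contains a newline).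
import Mathlib
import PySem

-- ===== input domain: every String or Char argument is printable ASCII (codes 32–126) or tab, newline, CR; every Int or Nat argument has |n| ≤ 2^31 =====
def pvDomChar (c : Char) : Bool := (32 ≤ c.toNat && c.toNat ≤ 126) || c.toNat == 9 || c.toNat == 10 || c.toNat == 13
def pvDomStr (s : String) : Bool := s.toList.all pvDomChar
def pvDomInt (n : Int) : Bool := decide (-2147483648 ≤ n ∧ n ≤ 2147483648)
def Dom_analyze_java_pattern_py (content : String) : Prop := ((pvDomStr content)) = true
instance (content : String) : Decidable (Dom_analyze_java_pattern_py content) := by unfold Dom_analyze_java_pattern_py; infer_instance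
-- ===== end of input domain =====

-- B replaces A's five independent whole-string scans by one fold over the split lines keeping all five tallies (alternative decomposition, same cost).

-- ===== PORT A =====
-- A: five whole-content substring counts plus a filter over content.split('\n')
def analyze_java_pattern_py (content : String) : List (String × Int) :=
  [("classes", (PySem.Str.count content "class " : Int)),
   ("methods", (PySem.Str.count content "public " : Int) + (PySem.Str.count content "private " : Int)
               + (PySem.Str.count content "protected " : Int)),
   ("interfaces", (PySem.Str.count content "interface " : Int)),
   ("annotations", (PySem.Str.count content "@" : Int)),
   ("imports", (((PySem.Chars.splitOn content.toList ['\n']).filter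
       (fun line => PySem.Chars.startswith (PySem.Chars.strip line) "import".toList)).length : Int))]

-- ===== PORT B =====
-- B: one fold over content.split('\n') carrying the five counters (classes, methods, interfaces, annotations, imports)
def analyze_java_pattern_py_alt (content : String) : List (String × Int) :=
  let st := (PySem.Chars.splitOn content.toList ['\n']).foldl
    (fun (st : Int × Int × Int × Int × Int) line =>
      (st.1 + (PySem.Chars.count line "class ".toList : Int),
       st.2.1 + ((PySem.Chars.count line "public ".toList : Int) + (PySem.Chars.count line "private ".toList : Int)
                 + (PySem.Chars.count line "protected ".toList : Int)),
       st.2.2.1 + (PySem.Chars.count line "interface ".toList : Int),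
       st.2.2.2.1 + (PySem.Chars.count line "@".toList : Int),
       st.2.2.2.2 + (if PySem.Chars.startswith (PySem.Chars.strip line) "import".toList then (1 : Int) else 0)))
    (0, 0, 0, 0, 0)
  [("classes", st.1), ("methods", st.2.1), ("interfaces", st.2.2.1),
   ("annotations", st.2.2.2.1), ("imports", st.2.2.2.2)]

-- ===== PRECONDITION & SPEC =====
def Spec_analyze_java_pattern_py (content : String) (out : List (String × Int)) : Prop := out = analyze_java_pattern_py_alt content
instance (content : String) (out : List (String × Int)) : Decidable (Spec_analyze_java_pattern_py content out) := by unfold Spec_analyze_java_pattern_py; infer_instance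

-- ===== CLAIM (what is proved, stated in full; the proofs are below) =====
def Claim_equal_analyze_java_pattern_py : Prop := ∀ (content : String), Dom_analyze_java_pattern_py content → Spec_analyze_java_pattern_py content (analyze_java_pattern_py content)

-- ===== LEMMAS AND PROOFS =====

-- occurrence counter matching Python's non-overlapping str.count, structurally on the scanned list
def pvOcc (p : List Char) : List Char → Nat
  | [] => 0
  | c :: t => if p.isPrefixOf (c :: t) then 1 + pvOcc p (t.drop (p.length - 1)) else pvOcc p t
termination_by l => l.length
decreasing_by
  all_goals simp

theorem pvOcc_nil (p : List Char) : pvOcc p [] = 0 := by simp [pvOcc]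

theorem count_go_eq_pvOcc (p : List Char) (hp : p ≠ []) :
    ∀ fuel l acc, l.length ≤ fuel → PySem.Chars.count.go p fuel l acc = acc + pvOcc p l := by
  intro fuel
  induction fuel with
  | zero =>
    intro l acc h
    have hl : l = [] := by cases l <;> simp_all
    subst hl; simp [PySem.Chars.count.go, pvOcc]
  | succ n ih =>
    intro l acc h
    cases l with
    | nil => simp [PySem.Chars.count.go, pvOcc]
    | cons c t =>
      have hplen : 1 ≤ p.length := by cases p <;> simp_all
      rw [show PySem.Chars.count.go p (n+1) (c :: t) acc =
            if p.isPrefixOf (c :: t) then PySem.Chars.count.go p n ((c :: t).drop p.length) (acc+1)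
            else PySem.Chars.count.go p n t acc from by simp [PySem.Chars.count.go]]
      by_cases hpre : p.isPrefixOf (c :: t)
      · rw [if_pos hpre]
        obtain ⟨m, hm⟩ : ∃ m, p.length = m + 1 := ⟨p.length - 1, by omega⟩
        have hdrop : (c :: t).drop p.length = t.drop (p.length - 1) := by
          rw [hm]; simp
        rw [hdrop, ih _ _ (by simp at h ⊢; omega)]
        rw [show pvOcc p (c :: t) = 1 + pvOcc p (t.drop (p.length - 1)) from by
          rw [pvOcc]; simp [hpre]]
        omega
      · rw [if_neg hpre]
        rw [ih t acc (by simp at h ⊢; omega)]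
        rw [show pvOcc p (c :: t) = pvOcc p t from by rw [pvOcc]; simp [hpre]]

theorem count_eq_pvOcc (s p : List Char) (hp : p ≠ []) : PySem.Chars.count s p = pvOcc p s := by
  have : PySem.Chars.count s p = PySem.Chars.count.go p s.length s 0 := by
    simp [PySem.Chars.count, hp]
  rw [this, count_go_eq_pvOcc p hp s.length s 0 le_rfl]; omega

-- structural split on '\n'
def pvSplitNL : List Char → List (List Char)
  | [] => [[]]
  | c :: t =>
    if c = '\n' then [] :: pvSplitNL t
    else
      match pvSplitNL t with
      | [] => [[c]]
      | h :: r => (c :: h) :: r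

theorem pvSplitNL_ne_nil (l : List Char) : pvSplitNL l ≠ [] := by
  cases l with
  | nil => simp [pvSplitNL]
  | cons c t =>
    simp only [pvSplitNL]
    split
    · simp
    · cases pvSplitNL t <;> simp

def pvConsHead (pre : List Char) : List (List Char) → List (List Char)
  | [] => [pre]
  | h :: r => (pre ++ h) :: r

theorem splitOn_go_eq (fuel : Nat) :
    ∀ (l cur : List Char) (acc : List (List Char)), l.length ≤ fuel →
      PySem.Chars.splitOn.go ['\n'] fuel l cur acc = acc.reverse ++ pvConsHead cur.reverse (pvSplitNL l) := by
  induction fuel with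
  | zero =>
    intro l cur acc h
    have hl : l = [] := by cases l <;> simp_all
    subst hl; simp [PySem.Chars.splitOn.go, pvSplitNL, pvConsHead]
  | succ n ih =>
    intro l cur acc h
    cases l with
    | nil => simp [PySem.Chars.splitOn.go, pvSplitNL, pvConsHead]
    | cons c rest =>
      rw [show PySem.Chars.splitOn.go ['\n'] (n+1) (c :: rest) cur acc =
            if ['\n'].isPrefixOf (c :: rest) then
              PySem.Chars.splitOn.go ['\n'] n ((c :: rest).drop 1) [] (cur.reverse :: acc)
            else PySem.Chars.splitOn.go ['\n'] n rest (c :: cur) acc from by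
        simp [PySem.Chars.splitOn.go]]
      by_cases hc : c = '\n'
      · have hpre : ['\n'].isPrefixOf (c :: rest) = true := by simp [List.isPrefixOf, hc]
        simp only [hpre, if_true, List.drop_succ_cons, List.drop_zero]
        rw [ih rest [] (cur.reverse :: acc) (by simp at h ⊢; omega)]
        obtain ⟨hh, r, hr⟩ : ∃ hh r, pvSplitNL rest = hh :: r := by
          cases hsp : pvSplitNL rest with
          | nil => exact absurd hsp (pvSplitNL_ne_nil rest)
          | cons a b => exact ⟨a, b, rfl⟩
        simp [pvSplitNL, hc, hr, pvConsHead]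
      · have hpre : ['\n'].isPrefixOf (c :: rest) = false := by simp [List.isPrefixOf]; exact fun h' => hc h'.symm
        simp only [hpre]
        rw [ih rest (c :: cur) acc (by simp at h ⊢; omega)]
        obtain ⟨hh, r, hr⟩ : ∃ hh r, pvSplitNL rest = hh :: r := by
          cases hsp : pvSplitNL rest with
          | nil => exact absurd hsp (pvSplitNL_ne_nil rest)
          | cons a b => exact ⟨a, b, rfl⟩
        simp [pvSplitNL, hc, hr, pvConsHead]

theorem splitOn_eq_pvSplitNL (s : List Char) : PySem.Chars.splitOn s ['\n'] = pvSplitNL s := by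
  have : PySem.Chars.splitOn s ['\n'] = PySem.Chars.splitOn.go ['\n'] (s.length + 1) s [] [] := rfl
  rw [this, splitOn_go_eq (s.length + 1) s [] [] (by omega)]
  obtain ⟨hh, r, hr⟩ : ∃ hh r, pvSplitNL s = hh :: r := by
    cases hsp : pvSplitNL s with
    | nil => exact absurd hsp (pvSplitNL_ne_nil s)
    | cons a b => exact ⟨a, b, rfl⟩
  simp [hr, pvConsHead]

-- join with '\n', inverse of pvSplitNL
def pvJoinNL : List (List Char) → List Char
  | [] => []
  | [x] => x
  | x :: y :: r => x ++ '\n' :: pvJoinNL (y :: r)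

theorem pvJoinNL_pvSplitNL (l : List Char) : pvJoinNL (pvSplitNL l) = l := by
  induction l with
  | nil => simp [pvSplitNL, pvJoinNL]
  | cons c t ih =>
    by_cases hc : c = '\n'
    · obtain ⟨hh, r, hr⟩ : ∃ hh r, pvSplitNL t = hh :: r := by
        cases hsp : pvSplitNL t with
        | nil => exact absurd hsp (pvSplitNL_ne_nil t)
        | cons a b => exact ⟨a, b, rfl⟩
      rw [hr] at ih
      simp [pvSplitNL, hc, hr, pvJoinNL, ih]
    · obtain ⟨hh, r, hr⟩ : ∃ hh r, pvSplitNL t = hh :: r := by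
        cases hsp : pvSplitNL t with
        | nil => exact absurd hsp (pvSplitNL_ne_nil t)
        | cons a b => exact ⟨a, b, rfl⟩
      rw [hr] at ih
      cases r with
      | nil => simp [pvSplitNL, hc, hr, pvJoinNL] at ih ⊢; simp [ih]
      | cons y r' => simp [pvSplitNL, hc, hr, pvJoinNL] at ih ⊢; simp [ih]

theorem isPrefixOf_append_nl (p : List Char) (hnl : '\n' ∉ p) :
    ∀ (a b : List Char), p.isPrefixOf (a ++ '\n' :: b) = p.isPrefixOf a := by
  induction p with
  | nil => intro a b; simp [List.isPrefixOf]
  | cons h q ih =>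
    intro a b
    cases a with
    | nil =>
      have : h ≠ '\n' := by intro hh; exact hnl (by simp [hh])
      simp [List.isPrefixOf, this]
    | cons c t =>
      have hq : '\n' ∉ q := fun hm => hnl (by simp [hm])
      simp only [List.cons_append, List.isPrefixOf]
      rw [ih hq t b]

theorem pvOcc_append_nl (p : List Char) (hp : p ≠ []) (hnl : '\n' ∉ p) :
    ∀ (a b : List Char), pvOcc p (a ++ '\n' :: b) = pvOcc p a + pvOcc p b := by
  have key : ∀ (n : Nat) (a b : List Char), a.length ≤ n →
      pvOcc p (a ++ '\n' :: b) = pvOcc p a + pvOcc p b := by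
    intro n
    induction n with
    | zero =>
      intro a b h
      have ha : a = [] := by cases a <;> simp_all
      subst ha
      have hpre : p.isPrefixOf ('\n' :: b) = false := by
        rw [show ('\n' :: b) = ([] : List Char) ++ '\n' :: b from rfl, isPrefixOf_append_nl p hnl]
        cases p <;> simp_all [List.isPrefixOf]
      simp only [List.nil_append]
      rw [show pvOcc p ('\n' :: b) = pvOcc p b from by rw [pvOcc]; simp [hpre]]
      simp [pvOcc_nil]
    | succ n ih =>
      intro a b h
      cases a with
      | nil =>
        have hpre : p.isPrefixOf ('\n' :: b) = false := by
          rw [show ('\n' :: b) = ([] : List Char) ++ '\n' :: b from rfl, isPrefixOf_append_nl p hnl]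
          cases p <;> simp_all [List.isPrefixOf]
        simp only [List.nil_append]
        rw [show pvOcc p ('\n' :: b) = pvOcc p b from by rw [pvOcc]; simp [hpre]]
        simp [pvOcc_nil]
      | cons c t =>
        have hplen : 1 ≤ p.length := by cases p <;> simp_all
        have hpre : p.isPrefixOf (c :: t ++ '\n' :: b) = p.isPrefixOf (c :: t) :=
          isPrefixOf_append_nl p hnl (c :: t) b
        by_cases hp2 : p.isPrefixOf (c :: t)
        · have hp3 : p.isPrefixOf (c :: (t ++ '\n' :: b)) = true := by
            rw [← List.cons_append, hpre]; exact hp2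
          have hle : p.length ≤ t.length + 1 := by
            have := (List.isPrefixOf_iff_prefix.mp hp2).length_le
            simpa using this
          have hdrop : (t ++ '\n' :: b).drop (p.length - 1) = t.drop (p.length - 1) ++ '\n' :: b :=
            List.drop_append_of_le_length (by omega)
          rw [show (c :: t ++ '\n' :: b) = c :: (t ++ '\n' :: b) from rfl]
          rw [show pvOcc p (c :: (t ++ '\n' :: b)) =
                1 + pvOcc p ((t ++ '\n' :: b).drop (p.length - 1)) from by
            rw [pvOcc]; simp [hp3]]
          rw [hdrop, ih _ b (by simp at h ⊢; omega)]
          rw [show pvOcc p (c :: t) = 1 + pvOcc p (t.drop (p.length - 1)) from by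
            rw [pvOcc]; simp [hp2]]
          omega
        · have hp3 : p.isPrefixOf (c :: (t ++ '\n' :: b)) = false := by
            rw [← List.cons_append, hpre]; exact Bool.eq_false_iff.mpr hp2
          rw [show (c :: t ++ '\n' :: b) = c :: (t ++ '\n' :: b) from rfl]
          rw [show pvOcc p (c :: (t ++ '\n' :: b)) = pvOcc p (t ++ '\n' :: b) from by
            rw [pvOcc]; simp [hp3]]
          rw [ih t b (by simp at h ⊢; omega)]
          rw [show pvOcc p (c :: t) = pvOcc p t from by rw [pvOcc]; simp [hp2]]
  exact fun a b => key a.length a b le_rfl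

theorem pvOcc_pvJoinNL (p : List Char) (hp : p ≠ []) (hnl : '\n' ∉ p) :
    ∀ ps : List (List Char), pvOcc p (pvJoinNL ps) = (ps.map (pvOcc p)).sum := by
  intro ps
  induction ps with
  | nil => simp [pvJoinNL, pvOcc_nil]
  | cons x rest ih =>
    cases rest with
    | nil => simp [pvJoinNL]
    | cons y r =>
      simp only [pvJoinNL]
      rw [pvOcc_append_nl p hp hnl x (pvJoinNL (y :: r)), ih]
      simp

-- the central fact: Python's whole-string count equals the sum of per-line counts for a newline-free pattern
theorem count_split (s p : List Char) (hp : p ≠ []) (hnl : '\n' ∉ p) :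
    ((PySem.Chars.splitOn s ['\n']).map (fun l => PySem.Chars.count l p)).sum = PySem.Chars.count s p := by
  rw [splitOn_eq_pvSplitNL]
  have hmap : (pvSplitNL s).map (fun l => PySem.Chars.count l p) = (pvSplitNL s).map (pvOcc p) :=
    List.map_congr_left (fun l _ => count_eq_pvOcc l p hp)
  rw [hmap, ← pvOcc_pvJoinNL p hp hnl, pvJoinNL_pvSplitNL, count_eq_pvOcc s p hp]

-- B's fold over a 5-tuple of counters is the 5-tuple of sums
theorem foldl_five (f1 f2 f3 f4 f5 : List Char → Int) :
    ∀ (lines : List (List Char)) (a b c d e : Int),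
      lines.foldl (fun (st : Int × Int × Int × Int × Int) line =>
          (st.1 + f1 line, st.2.1 + f2 line, st.2.2.1 + f3 line,
           st.2.2.2.1 + f4 line, st.2.2.2.2 + f5 line)) (a, b, c, d, e)
        = (a + (lines.map f1).sum, b + (lines.map f2).sum, c + (lines.map f3).sum,
           d + (lines.map f4).sum, e + (lines.map f5).sum) := by
  intro lines
  induction lines with
  | nil => intro a b c d e; simp
  | cons x rest ih =>
    intro a b c d e
    simp only [List.foldl_cons, List.map_cons, List.sum_cons]
    rw [ih]
    ring_nf

-- sum of Int-cast counts = cast of Nat-sum, then count_split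
theorem sum_count_int (s p : List Char) (hp : p ≠ []) (hnl : '\n' ∉ p) :
    ((PySem.Chars.splitOn s ['\n']).map (fun l => (PySem.Chars.count l p : Int))).sum
      = (PySem.Chars.count s p : Int) := by
  rw [show ((PySem.Chars.splitOn s ['\n']).map (fun l => (PySem.Chars.count l p : Int)))
        = ((PySem.Chars.splitOn s ['\n']).map (fun l => PySem.Chars.count l p)).map (Nat.cast) from by
    rw [List.map_map]; rfl]
  rw [← Nat.cast_list_sum, count_split s p hp hnl]

-- ===== VERDICT (by name: the statement is the Claim_ definition above) =====
theorem analyze_java_pattern_py_spec : Claim_equal_analyze_java_pattern_py := by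
  intro content _
  unfold Spec_analyze_java_pattern_py analyze_java_pattern_py analyze_java_pattern_py_alt
  rw [foldl_five]
  simp only [PySem.Str.count_eq, zero_add]
  have hclass := sum_count_int content.toList "class ".toList (by decide) (by decide)
  have hpub := sum_count_int content.toList "public ".toList (by decide) (by decide)
  have hpriv := sum_count_int content.toList "private ".toList (by decide) (by decide)
  have hprot := sum_count_int content.toList "protected ".toList (by decide) (by decide)
  have hintf := sum_count_int content.toList "interface ".toList (by decide) (by decide)
  have hat := sum_count_int content.toList "@".toList (by decide) (by decide)
  have hmeth : ((PySem.Chars.splitOn content.toList ['\n']).map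
      (fun line => (PySem.Chars.count line "public ".toList : Int)
        + (PySem.Chars.count line "private ".toList : Int)
        + (PySem.Chars.count line "protected ".toList : Int))).sum
      = (PySem.Chars.count content.toList "public ".toList : Int)
        + (PySem.Chars.count content.toList "private ".toList : Int)
        + (PySem.Chars.count content.toList "protected ".toList : Int) := by
    rw [← hpub, ← hpriv, ← hprot]
    induction (PySem.Chars.splitOn content.toList ['\n']) with
    | nil => simp
    | cons x rest ih => simp only [List.map_cons, List.sum_cons]; rw [ih]; ring
  have himp : ((PySem.Chars.splitOn content.toList ['\n']).map
      (fun line => if PySem.Chars.startswith (PySem.Chars.strip line) "import".toList then (1 : Int) else 0)).sum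
      = (((PySem.Chars.splitOn content.toList ['\n']).filter
          (fun line => PySem.Chars.startswith (PySem.Chars.strip line) "import".toList)).length : Int) := by
    rw [PySem.List.sum_map_ite_one_zero]
    simp [List.countP_eq_length_filter]
  rw [hclass, hmeth, hintf, hat, himp]
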